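-- pv_equiv track=rewrite | github.com/alexgorji/musurgia | musurgia/basic_functions.py | dToX
-- ===== SOURCE A (Python) =====
-- def dToX(input_list, first_element=0):
--     if isinstance(input_list, list) is False:
--         raise TypeError('xToD(input_list)')
--     else:
--         output = [first_element]
--         for i in range(len(input_list)):
--             output.append(input_list[i] + output[i])
--         return output
-- ===== SOURCE B (Python) =====
-- def dToX(input_list, first_element=0):
--     if isinstance(input_list, list) is False:
--         raise TypeError('xToD(input_list)')
--
--     def build(lo, hi, start):
--         # cumulative sums of input_list[lo:hi] starting from start, by halving
--         if hi - lo == 0: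
--             return [start]
--         if hi - lo == 1:
--             return [start, start + input_list[lo]]
--         mid = (lo + hi) // 2
--         left = build(lo, mid, start)
--         right = build(mid, hi, left[-1])
--         return left + right[1:]
--
--     return build(0, len(input_list), first_element)
-- ===== Notes on version B (the rewrite author's own statement) =====
-- stated objective: alternative
-- what changed: Replaced the left-to-right index loop that appends input_list[i] + output[i] by a divide-and-conquer construction: the index range is split in half, each half is solved recursively (the right half seeded with the left half's last sum), and the pieces are concatenated; correct because cumulative sums compose across a split point.
import Mathlib
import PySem

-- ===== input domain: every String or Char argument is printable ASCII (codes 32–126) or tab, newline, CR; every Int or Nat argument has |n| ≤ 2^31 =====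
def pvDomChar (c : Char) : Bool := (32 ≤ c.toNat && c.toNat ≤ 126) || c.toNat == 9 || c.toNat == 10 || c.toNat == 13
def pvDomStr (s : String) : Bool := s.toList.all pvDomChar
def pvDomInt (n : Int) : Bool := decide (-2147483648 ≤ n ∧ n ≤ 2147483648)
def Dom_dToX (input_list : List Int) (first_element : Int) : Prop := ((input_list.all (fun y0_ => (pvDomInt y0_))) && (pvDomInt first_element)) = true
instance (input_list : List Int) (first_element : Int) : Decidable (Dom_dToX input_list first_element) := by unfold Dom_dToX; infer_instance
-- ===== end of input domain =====

-- B replaces A's left-to-right loop (which appends input_list[i] + output[i],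
-- reading back the growing output) by a divide-and-conquer construction: the index
-- range is halved, each half is built recursively (the right half seeded with the
-- left half's last sum), and the pieces are concatenated.
-- The isinstance TypeError cannot fire on a List Int input, so both ports are total.

-- ===== PORT A =====
-- output.append(input_list[i] + output[i]); both indices are always in range
-- (0 ≤ i < len(input_list) ≤ len(output)), so pyGetD with default 0 is exact here.
def dToX (input_list : List Int) (first_element : Int) : List Int :=
  (PySem.List.pyRange 0 (input_list.length : Int) 1).foldl
    (fun output i =>
      output ++ [PySem.List.pyGetD input_list i 0 + PySem.List.pyGetD output i 0])
    [first_element]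

-- ===== PORT B =====
-- build(lo, hi, start): lo, hi are Nat (always 0 ≤ lo ≤ hi ≤ len in B, so Nat '/'
-- matches Python's '//' here); input_list[lo] and left[-1] are always in range, so
-- pyGetD with default 0 is exact. fuel ≥ hi - lo only makes the recursion structural.
def dToXBuild (l : List Int) : Nat → Nat → Nat → Int → List Int
  | 0, _, _, start => [start]
  | fuel + 1, lo, hi, start =>
    if hi - lo = 0 then [start]
    else if hi - lo = 1 then [start, start + PySem.List.pyGetD l (lo : Int) 0]
    else
      let mid := (lo + hi) / 2
      let left := dToXBuild l fuel lo mid start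
      let right := dToXBuild l fuel mid hi (PySem.List.pyGetD left (-1) 0)
      left ++ PySem.List.slice right (some 1) none

def dToX_alt (input_list : List Int) (first_element : Int) : List Int :=
  dToXBuild input_list input_list.length 0 input_list.length first_element

-- ===== PRECONDITION & SPEC =====
def Spec_dToX (input_list : List Int) (first_element : Int) (out : List Int) : Prop := out = dToX_alt input_list first_element
instance (input_list : List Int) (first_element : Int) (out : List Int) : Decidable (Spec_dToX input_list first_element out) := by unfold Spec_dToX; infer_instance

-- ===== CLAIM (what is proved, stated in full; the proofs are below) =====
def Claim_equal_dToX : Prop := ∀ (input_list : List Int) (first_element : Int), Dom_dToX input_list first_element → Spec_dToX input_list first_element (dToX input_list first_element)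

-- ===== LEMMAS AND PROOFS =====

-- both sides are characterised through scanl: the common normal form

-- the last entry of a scanl is the fold
theorem scanl_getLastD (u : List Int) (s d : Int) :
    (List.scanl (· + ·) s u).getLastD d = List.foldl (· + ·) s u := by
  induction u generalizing s d with
  | nil => simp
  | cons x xs ih => simp only [List.scanl_cons, List.getLastD_cons, List.foldl_cons, ih]

-- scanl splits across an append: the right part continues from the left fold
theorem scanl_append_tail (u v : List Int) (s : Int) :
    List.scanl (· + ·) s (u ++ v)
      = List.scanl (· + ·) s u ++ (List.scanl (· + ·) (List.foldl (· + ·) s u) v).tail := by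
  induction u generalizing s with
  | nil => cases v <;> simp [List.scanl]
  | cons x xs ih => simp only [List.cons_append, List.scanl_cons, List.foldl_cons, ih]

-- B: the divide-and-conquer build of a segment is scanl on that segment
theorem dToXBuild_eq_scanl (l : List Int) :
    ∀ (fuel n lo : Nat) (s : Int), n ≤ fuel → lo + n ≤ l.length →
      dToXBuild l fuel lo (lo + n) s = List.scanl (· + ·) s ((l.drop lo).take n) := by
  intro fuel
  induction fuel with
  | zero =>
    intro n lo s hf _
    have h0 : n = 0 := by omega
    subst h0
    simp [dToXBuild]
  | succ fuel ih =>
    intro n lo s hf hle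
    simp only [dToXBuild, Nat.add_sub_cancel_left]
    split_ifs with h0 h1
    · subst h0; simp
    · subst h1
      have hlt : lo < l.length := by omega
      have htake : (l.drop lo).take 1 = [l[lo]] := by
        rw [List.take_one, List.head?_drop, List.getElem?_eq_getElem hlt]; rfl
      rw [htake]
      simp [List.scanl, PySem.List.pyGetD_natCast, List.getElem?_eq_getElem hlt]
    · have hmid : (lo + (lo + n)) / 2 = lo + n / 2 := by omega
      set m := n / 2 with hm
      have hm1 : 1 ≤ m := by omega
      have hmn : m < n := by omega
      have hleft : dToXBuild l fuel lo (lo + m) s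
          = List.scanl (· + ·) s ((l.drop lo).take m) := ih m lo s (by omega) (by omega)
      have hsplit : lo + n = (lo + m) + (n - m) := by omega
      have hlast : PySem.List.pyGetD (List.scanl (· + ·) s ((l.drop lo).take m)) (-1) 0
          = List.foldl (· + ·) s ((l.drop lo).take m) := by
        rw [PySem.List.pyGetD, PySem.List.pyGet?_neg_one, ← List.getLastD_eq_getLast?,
          scanl_getLastD]
      have hright : dToXBuild l fuel (lo + m) (lo + n)
            (List.foldl (· + ·) s ((l.drop lo).take m))
          = List.scanl (· + ·) (List.foldl (· + ·) s ((l.drop lo).take m))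
              ((l.drop (lo + m)).take (n - m)) := by
        rw [hsplit]
        exact ih (n - m) (lo + m) _ (by omega) (by omega)
      simp only [hmid, hleft, hlast, hright, PySem.List.slice_from_one]
      rw [← scanl_append_tail]
      congr 1
      have hdd : List.drop (lo + m) l = (List.drop lo l).drop m := by
        rw [List.drop_drop, Nat.add_comm]
      rw [hdd, ← List.take_add, Nat.add_sub_cancel' (Nat.le_of_lt hmn)]

-- appending the next partial sum extends the scanl of a one-longer prefix
theorem scanl_take_succ (l : List Int) (f : Int) (n : ℕ) (h : n < l.length) :
    List.scanl (· + ·) f (l.take (n+1))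
      = List.scanl (· + ·) f (l.take n)
        ++ [l[n] + List.foldl (· + ·) f (l.take n)] := by
  induction n generalizing l f with
  | zero =>
    cases l with
    | nil => simp at h
    | cons x xs => simp [List.scanl_cons, Int.add_comm]
  | succ n ih =>
    cases l with
    | nil => simp at h
    | cons x xs =>
      simp only [List.take_succ_cons, List.scanl_cons, List.foldl_cons,
        List.getElem_cons_succ]
      exact congrArg (f :: ·) (ih xs (f + x) (by simpa using h))

-- A: loop invariant — after the first n iterations the output is scanl on the n-prefix
theorem dToX_loop_take (l : List Int) (f : Int) :
    ∀ n : ℕ, n ≤ l.length →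
      (PySem.List.pyRange 0 (n : Int) 1).foldl
        (fun output i =>
          output ++ [PySem.List.pyGetD l i 0 + PySem.List.pyGetD output i 0])
        [f]
      = List.scanl (· + ·) f (l.take n) := by
  intro n hn
  induction n with
  | zero => simp
  | succ n ih =>
    have hlt : n < l.length := hn
    have hle : n ≤ l.length := Nat.le_of_lt hlt
    have hsplit : PySem.List.pyRange 0 ((n : Int) + 1) 1
        = PySem.List.pyRange 0 (n : Int) 1 ++ [(n : Int)] :=
      PySem.List.pyRange_one_succ_right (Int.natCast_nonneg n)
    have hcast : ((n + 1 : ℕ) : Int) = (n : Int) + 1 := by push_cast; ring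
    rw [hcast, hsplit, List.foldl_append, ih hle]
    simp only [List.foldl_cons, List.foldl_nil, PySem.List.pyGetD_natCast]
    have hlen : n < (List.scanl (· + ·) f (l.take n)).length := by
      simp [List.length_scanl]
      omega
    have hget : (List.scanl (· + ·) f (l.take n)).getD n 0
        = List.foldl (· + ·) f (l.take n) := by
      rw [List.getD_eq_getElem _ _ hlen, List.getElem_scanl]
      simp [List.take_take]
    rw [hget, List.getD_eq_getElem _ _ hlt, scanl_take_succ l f n hlt]

-- ===== VERDICT (by name: the statement is the Claim_ definition above) =====
theorem dToX_spec : Claim_equal_dToX := by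
  intro l f _
  show dToX l f = dToX_alt l f
  unfold dToX dToX_alt
  have hb := dToXBuild_eq_scanl l l.length l.length 0 f le_rfl (by omega)
  simp only [Nat.zero_add, List.drop_zero, List.take_length] at hb
  rw [hb]
  simpa using dToX_loop_take l f l.length le_rfl
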